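-- pv_equiv track=rewrite | github.com/Evanwu1125/AutoWebWorld | trajectory/bfs/gui_mapping.py | generate_insertion_permutations
-- ===== SOURCE A (Python) =====
-- def generate_insertion_permutations(opt_actions: list, slot_count: int) -> list:
--     """
--     生成可选动作在插入槽位中的所有排列方式
--     slot_count: 可插入的位置数（表单动作之间 + CAPTCHA 之前）
--     返回: [(positions, permutation), ...] 其中 positions 是插入位置列表
--     """
--     from itertools import permutations as perms
--     results = []
--     n = len(opt_actions)
--
--     if n == 0:
--         return [([], [])]
--
--     # 生成所有可选动作的排列
--     for perm in perms(opt_actions):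
--         # 生成所有可能的位置组合（带重复，递增）
--         def gen_positions(count, max_pos, current=[]):
--             if count == 0:
--                 results.append((list(current), list(perm)))
--                 return
--             start = current[-1] if current else 0
--             for pos in range(start, max_pos):
--                 gen_positions(count - 1, max_pos, current + [pos])
--
--         gen_positions(n, slot_count)
--
--     return results
-- ===== SOURCE B (Python) =====
-- from itertools import permutations, combinations_with_replacement
--
--
-- def generate_insertion_permutations(opt_actions: list, slot_count: int) -> list:
--     """
--     生成可选动作在插入槽位中的所有排列方式
--     slot_count: 可插入的位置数（表单动作之间 + CAPTCHA 之前）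
--     返回: [(positions, permutation), ...] 其中 positions 是插入位置列表
--     """
--     n = len(opt_actions)
--     if n == 0:
--         return [([], [])]
--     positions = [list(p) for p in combinations_with_replacement(range(slot_count), n)]
--     return [(pos, list(perm))
--             for perm in permutations(opt_actions)
--             for pos in positions]
-- ===== Notes on version B (the rewrite author's own statement) =====
-- stated objective: idiomatic
-- what changed: Replaces the per-permutation mutable recursive position generator with positions precomputed once via itertools.combinations_with_replacement and a flat double comprehension.
import Mathlib
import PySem

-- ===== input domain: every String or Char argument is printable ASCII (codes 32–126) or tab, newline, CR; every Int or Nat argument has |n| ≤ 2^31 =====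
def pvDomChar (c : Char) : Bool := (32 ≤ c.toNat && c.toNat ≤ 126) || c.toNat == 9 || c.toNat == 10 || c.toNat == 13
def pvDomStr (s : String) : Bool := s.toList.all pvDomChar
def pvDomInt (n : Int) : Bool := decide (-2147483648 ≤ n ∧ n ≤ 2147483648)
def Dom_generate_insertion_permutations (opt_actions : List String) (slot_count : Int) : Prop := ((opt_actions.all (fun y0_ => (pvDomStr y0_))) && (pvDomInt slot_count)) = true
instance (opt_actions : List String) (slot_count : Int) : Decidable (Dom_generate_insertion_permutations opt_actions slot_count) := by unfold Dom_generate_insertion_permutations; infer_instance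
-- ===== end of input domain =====

-- B precomputes the non-decreasing position tuples once (combinations_with_replacement)
-- and pairs them with each permutation in a flat double comprehension, instead of
-- re-running A's mutable recursive generator inside the permutation loop (objective: idiomatic).


-- ===== PORT A =====
-- itertools.permutations(l): all length-len(l) index-permutations in itertools order
-- (pick each index in turn, recurse on the remainder); shared by both ports since
-- both Pythons call itertools.permutations.
def pyPermutations : List String → List (List String)
  | [] => [[]]
  | a :: t =>
    (List.range (a :: t).length).attach.flatMap (fun i =>
      (pyPermutations ((a :: t).eraseIdx i.1)).map (fun rest => (a :: t).getD i.1 "" :: rest))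
  termination_by l => l.length
  decreasing_by
    have hi : i.1 < (a :: t).length := List.mem_range.mp i.2
    simp only [List.length_eraseIdx, if_pos hi]
    simp

-- gen_positions(count, max_pos, current): appends to the shared `results`; here the
-- results list is threaded through as an accumulator.
def genPositionsA (perm : List String) (maxPos : Int) (count : Nat) (current : List Int)
    (results : List (List Int × List String)) : List (List Int × List String) :=
  match count with
  | 0 => results ++ [(current, perm)]
  | Nat.succ c =>
    -- start = current[-1] if current else 0
    let start : Int := (current.getLast?).getD 0
    (PySem.List.pyRange start maxPos 1).foldl
      (fun res pos => genPositionsA perm maxPos c (current ++ [pos]) res) results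

def generate_insertion_permutations (opt_actions : List String) (slot_count : Int) : List (List Int × List String) :=
  let n := opt_actions.length
  if n = 0 then [([], [])]
  else
    (pyPermutations opt_actions).foldl
      (fun results perm => genPositionsA perm slot_count n [] results) []

-- ===== PORT B =====
-- combinations_with_replacement(range(slot_count), n): non-decreasing tuples in
-- lexicographic order; `start` is the smallest value still allowed.
def cwrRange (slot : Int) (n : Nat) (start : Int) : List (List Int) :=
  match n with
  | 0 => [[]]
  | Nat.succ m =>
    (PySem.List.pyRange start slot 1).flatMap
      (fun p => (cwrRange slot m p).map (fun rest => p :: rest))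

def generate_insertion_permutations_alt (opt_actions : List String) (slot_count : Int) : List (List Int × List String) :=
  let n := opt_actions.length
  if n = 0 then [([], [])]
  else
    let positions := cwrRange slot_count n 0
    (pyPermutations opt_actions).flatMap
      (fun perm => positions.map (fun pos => (pos, perm)))

-- ===== PRECONDITION & SPEC =====
def Spec_generate_insertion_permutations (opt_actions : List String) (slot_count : Int) (out : List (List Int × List String)) : Prop := out = generate_insertion_permutations_alt opt_actions slot_count
instance (opt_actions : List String) (slot_count : Int) (out : List (List Int × List String)) : Decidable (Spec_generate_insertion_permutations opt_actions slot_count out) := by unfold Spec_generate_insertion_permutations; infer_instance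

-- ===== CLAIM (what is proved, stated in full; the proofs are below) =====
def Claim_equal_generate_insertion_permutations : Prop := ∀ (opt_actions : List String) (slot_count : Int), Dom_generate_insertion_permutations opt_actions slot_count → Spec_generate_insertion_permutations opt_actions slot_count (generate_insertion_permutations opt_actions slot_count)

-- ===== LEMMAS AND PROOFS =====

-- A's recursive generator, on any prefix `current`, appends exactly the cwr suffixes
-- starting at current's last element (or 0), each prepended with `current`.
theorem genPositionsA_eq (perm : List String) (maxPos : Int) (count : Nat) :
    ∀ (current : List Int) (results : List (List Int × List String)),
      genPositionsA perm maxPos count current results =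
        results ++ (cwrRange maxPos count ((current.getLast?).getD 0)).map
          (fun suf => (current ++ suf, perm)) := by
  induction count with
  | zero => intro current results; simp [genPositionsA, cwrRange]
  | succ c ih =>
    intro current results
    simp only [genPositionsA, cwrRange]
    have hstep : ∀ (res : List (List Int × List String)) (pos : Int),
        genPositionsA perm maxPos c (current ++ [pos]) res =
          res ++ (cwrRange maxPos c pos).map (fun suf => (current ++ (pos :: suf), perm)) := by
      intro res pos
      rw [ih]
      simp
    calc (PySem.List.pyRange ((current.getLast?).getD 0) maxPos 1).foldl
          (fun res pos => genPositionsA perm maxPos c (current ++ [pos]) res) results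
        = (PySem.List.pyRange ((current.getLast?).getD 0) maxPos 1).foldl
          (fun res pos => res ++ (cwrRange maxPos c pos).map
            (fun suf => (current ++ (pos :: suf), perm))) results := by
          congr 1; funext res pos; exact hstep res pos
      _ = results ++ (PySem.List.pyRange ((current.getLast?).getD 0) maxPos 1).flatMap
            (fun pos => (cwrRange maxPos c pos).map
              (fun suf => (current ++ (pos :: suf), perm))) :=
          PySem.List.foldl_append_eq_flatMap _ _ _
      _ = _ := by
          simp [List.map_flatMap, List.map_map, Function.comp_def]

-- ===== VERDICT (by name: the statement is the Claim_ definition above) =====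
theorem generate_insertion_permutations_spec : Claim_equal_generate_insertion_permutations := by
  intro opt_actions slot_count _
  unfold Spec_generate_insertion_permutations
  unfold generate_insertion_permutations generate_insertion_permutations_alt
  by_cases h : opt_actions.length = 0
  · simp [h]
  · simp only [if_neg h]
    calc (pyPermutations opt_actions).foldl
          (fun results perm => genPositionsA perm slot_count opt_actions.length [] results) []
        = (pyPermutations opt_actions).foldl
          (fun results perm => results ++
            (cwrRange slot_count opt_actions.length 0).map (fun suf => (suf, perm))) [] := by
          congr 1; funext results perm
          rw [genPositionsA_eq]
          simp
      _ = [] ++ (pyPermutations opt_actions).flatMap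
            (fun perm => (cwrRange slot_count opt_actions.length 0).map (fun suf => (suf, perm))) :=
          PySem.List.foldl_append_eq_flatMap _ _ _
      _ = _ := by simp
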